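-- pv_equiv track=rewrite | github.com/alexchuang650730/aicore0711 | deployment/devices/mac/v4.4.0/mac_test_environment/package/core/components/collaboration_mcp/realtime_collaboration/realtime_collaboration_enhanced.py | _is_concurrent
-- ===== SOURCE A (Python) =====
-- from typing import Dict, List, Optional, Any, Set, Callable, Tuple
--
-- def _is_concurrent(clock1: Dict[str, int], clock2: Dict[str, int]) -> bool:
--     """检查两个向量时钟是否表示并发操作"""
--     try:
--         all_users = set(clock1.keys()) | set(clock2.keys())
--
--         clock1_greater = False
--         clock2_greater = False
--
--         for user in all_users:
--             val1 = clock1.get(user, 0)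
--             val2 = clock2.get(user, 0)
--
--             if val1 > val2:
--                 clock1_greater = True
--             elif val2 > val1:
--                 clock2_greater = True
--
--         # 如果两个时钟都有更大的值，则是并发的
--         return clock1_greater and clock2_greater
--
--     except Exception:
--         return False
-- ===== SOURCE B (Python) =====
-- def _is_concurrent(clock1, clock2):
--     """Merge-scan of the key-sorted items of both clocks; concurrent iff the scan
--     sees a difference in each direction (missing keys count as 0)."""
--     a = sorted(clock1.items())
--     b = sorted(clock2.items())
--     i = j = 0
--     gt = lt = False
--     while i < len(a) or j < len(b):
--         if j >= len(b) or (i < len(a) and a[i][0] < b[j][0]):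
--             v, w = a[i][1], 0
--             i += 1
--         elif i >= len(a) or b[j][0] < a[i][0]:
--             v, w = 0, b[j][1]
--             j += 1
--         else:
--             v, w = a[i][1], b[j][1]
--             i += 1
--             j += 1
--         if v > w:
--             gt = True
--         elif w > v:
--             lt = True
--     return gt and lt
-- ===== Notes on version B (the rewrite author's own statement) =====
-- stated objective: alternative
-- what changed: Replaces the union-of-keys set plus per-key dictionary lookups and flag loop with sorting both clocks' item lists by key and a two-pointer merge scan that compares aligned values directly (missing keys as 0); A's try/except is unreachable and dropped.
import Mathlib
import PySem

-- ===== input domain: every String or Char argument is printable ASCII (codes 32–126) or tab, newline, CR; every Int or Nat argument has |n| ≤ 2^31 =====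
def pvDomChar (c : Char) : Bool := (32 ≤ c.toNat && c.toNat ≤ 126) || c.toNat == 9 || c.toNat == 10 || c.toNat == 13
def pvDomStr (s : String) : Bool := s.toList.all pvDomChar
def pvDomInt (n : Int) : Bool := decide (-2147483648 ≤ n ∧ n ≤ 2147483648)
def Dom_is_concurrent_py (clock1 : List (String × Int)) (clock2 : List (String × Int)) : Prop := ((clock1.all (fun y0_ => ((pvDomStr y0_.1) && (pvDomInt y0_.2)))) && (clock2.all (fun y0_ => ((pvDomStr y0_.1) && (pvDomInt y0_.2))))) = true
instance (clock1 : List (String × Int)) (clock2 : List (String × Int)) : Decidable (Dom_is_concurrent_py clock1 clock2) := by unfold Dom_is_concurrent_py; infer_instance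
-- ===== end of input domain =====

-- B replaces A's union-of-keys flag loop (whose try/except is unreachable and omitted) by sorting both clocks' items by key and a two-pointer merge scan; an alternative algorithm, not claimed faster.


-- ===== PORT A =====
-- clock.get(user, 0): first-match lookup in the association list, default 0
def pvGet0 (d : List (String × Int)) (k : String) : Int :=
  match d.find? (fun p => p.1 == k) with
  | some p => p.2
  | none => 0

-- literal port of A: all_users = set(keys1) | set(keys2), then the two-flag loop;
-- the try/except Exception can never fire (get with default raises nothing), so it is omitted.
def is_concurrent_py (clock1 : List (String × Int)) (clock2 : List (String × Int)) : Bool :=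
  let all_users : PySem.Set String :=
    PySem.Set.union (PySem.Set.ofList (clock1.map (·.1))) (PySem.Set.ofList (clock2.map (·.1)))
  let flags :=
    all_users.foldl (fun (st : Bool × Bool) user =>
      let val1 := pvGet0 clock1 user
      let val2 := pvGet0 clock2 user
      if val1 > val2 then (true, st.2)
      else if val2 > val1 then (st.1, true)
      else st) (false, false)
  flags.1 && flags.2

-- ===== PORT B =====
-- dict.items() for the assoc-list representation of a dict: each distinct key (first occurrence) with its value
def pvItems (c : List (String × Int)) : List (String × Int) :=
  (PySem.List.dedup (c.map (·.1))).map (fun k => (k, pvGet0 c k))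

-- B's while loop: two-pointer merge over the two key-sorted item lists, threading the (gt, lt) flags
def pvMergeScan : List (String × Int) → List (String × Int) → Bool × Bool → Bool × Bool
  | [], [], st => st
  | (_, v) :: as, [], st =>
      pvMergeScan as [] (if v > 0 then (true, st.2) else if 0 > v then (st.1, true) else st)
  | [], (_, w) :: bs, st =>
      pvMergeScan [] bs (if 0 > w then (true, st.2) else if w > 0 then (st.1, true) else st)
  | (k, v) :: as, (k', w) :: bs, st =>
      if k < k' then
        pvMergeScan as ((k', w) :: bs) (if v > 0 then (true, st.2) else if 0 > v then (st.1, true) else st)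
      else if k' < k then
        pvMergeScan ((k, v) :: as) bs (if 0 > w then (true, st.2) else if w > 0 then (st.1, true) else st)
      else
        pvMergeScan as bs (if v > w then (true, st.2) else if w > v then (st.1, true) else st)
  termination_by as bs _ => as.length + bs.length

-- port of Source B: a = sorted(clock1.items()); b = sorted(clock2.items()); merge scan; return gt and lt
def is_concurrent_py_alt (clock1 : List (String × Int)) (clock2 : List (String × Int)) : Bool :=
  let a := PySem.List.sorted (pvItems clock1) (·.1) false
  let b := PySem.List.sorted (pvItems clock2) (·.1) false
  let r := pvMergeScan a b (false, false)
  r.1 && r.2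

-- ===== PRECONDITION & SPEC =====
def Spec_is_concurrent_py (clock1 : List (String × Int)) (clock2 : List (String × Int)) (out : Bool) : Prop := out = is_concurrent_py_alt clock1 clock2
instance (clock1 : List (String × Int)) (clock2 : List (String × Int)) (out : Bool) : Decidable (Spec_is_concurrent_py clock1 clock2 out) := by unfold Spec_is_concurrent_py; infer_instance

-- ===== CLAIM (what is proved, stated in full; the proofs are below) =====
def Claim_equal_is_concurrent_py : Prop := ∀ (clock1 : List (String × Int)) (clock2 : List (String × Int)), Dom_is_concurrent_py clock1 clock2 → Spec_is_concurrent_py clock1 clock2 (is_concurrent_py clock1 clock2)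

-- ===== LEMMAS AND PROOFS =====

-- A's flag loop accumulates exactly "some user has val1 > val2" / "some user has val2 > val1"
theorem foldA_eq (c1 c2 : List (String × Int)) (l : List String) (b1 b2 : Bool) :
    l.foldl (fun (st : Bool × Bool) user =>
      let val1 := pvGet0 c1 user
      let val2 := pvGet0 c2 user
      if val1 > val2 then (true, st.2)
      else if val2 > val1 then (st.1, true)
      else st) (b1, b2)
    = (b1 || l.any (fun u => decide (pvGet0 c1 u > pvGet0 c2 u)),
       b2 || l.any (fun u => decide (pvGet0 c2 u > pvGet0 c1 u))) := by
  induction l generalizing b1 b2 with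
  | nil => simp
  | cons x xs ih =>
    simp only [List.foldl_cons, List.any_cons]
    by_cases h1 : pvGet0 c1 x > pvGet0 c2 x
    · simp [h1, ih, not_lt.mpr (le_of_lt h1)]
    · by_cases h2 : pvGet0 c2 x > pvGet0 c1 x
      · simp [h1, h2, ih]
      · simp [h1, h2, ih]

-- any over two lists with the same members agrees
theorem any_congr_mem_iff {α : Type} (l1 l2 : List α) (p : α → Bool)
    (h : ∀ x, x ∈ l1 ↔ x ∈ l2) : l1.any p = l2.any p := by
  rw [Bool.eq_iff_iff]
  simp only [List.any_eq_true]
  constructor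
  · rintro ⟨x, hx, hp⟩; exact ⟨x, (h x).mp hx, hp⟩
  · rintro ⟨x, hx, hp⟩; exact ⟨x, (h x).mpr hx, hp⟩

theorem pvGet0_nil (k : String) : pvGet0 [] k = 0 := rfl

theorem pvGet0_cons_self (k : String) (v : Int) (t : List (String × Int)) :
    pvGet0 ((k, v) :: t) k = v := by simp [pvGet0]

theorem pvGet0_cons_ne (p : String × Int) (t : List (String × Int)) (k : String)
    (h : p.1 ≠ k) : pvGet0 (p :: t) k = pvGet0 t k := by
  have hb : (p.1 == k) = false := beq_eq_false_iff_ne.mpr h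
  simp [pvGet0, hb]

-- the flag update in both loops, as two Boolean ors
theorem upd_eq (st : Bool × Bool) (v w : Int) :
    (if v > w then (true, st.2) else if w > v then (st.1, true) else st)
      = (st.1 || decide (v > w), st.2 || decide (w > v)) := by
  rcases st with ⟨s1, s2⟩
  by_cases h1 : v > w
  · simp [h1, lt_asymm h1]
  · by_cases h2 : w > v <;> simp [h1, h2]

-- lookup in a key-nodup list is determined by membership
theorem pvGet0_of_mem (l : List (String × Int)) (hnd : (l.map (·.1)).Nodup)
    (k : String) (v : Int) (hm : (k, v) ∈ l) : pvGet0 l k = v := by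
  induction l with
  | nil => cases hm
  | cons p t ih =>
    simp only [List.map_cons, List.nodup_cons] at hnd
    rcases List.mem_cons.mp hm with h | h
    · rw [← h]; exact pvGet0_cons_self k v t
    · have hne : p.1 ≠ k := by
        intro he
        exact hnd.1 (he ▸ (List.mem_map.mpr ⟨(k, v), h, rfl⟩))
      rw [pvGet0_cons_ne p t k hne]
      exact ih hnd.2 h

theorem pvGet0_of_not_mem (l : List (String × Int)) (k : String)
    (h : k ∉ l.map (·.1)) : pvGet0 l k = 0 := by
  unfold pvGet0
  rw [List.find?_eq_none.mpr]
  intro p hp hbeq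
  exact h (List.mem_map.mpr ⟨p, hp, (by simpa using hbeq)⟩)

-- the merge scan computes the two "exists a key where one side is larger" flags
theorem mergeScan_eq (as bs : List (String × Int))
    (hA : as.Pairwise (fun p q => p.1 < q.1)) (hB : bs.Pairwise (fun p q => p.1 < q.1))
    (b1 b2 : Bool) :
    pvMergeScan as bs (b1, b2)
      = (b1 || (as.map (·.1) ++ bs.map (·.1)).any (fun k => decide (pvGet0 as k > pvGet0 bs k)),
         b2 || (as.map (·.1) ++ bs.map (·.1)).any (fun k => decide (pvGet0 bs k > pvGet0 as k))) := by
  have H : ∀ (n : Nat) (as bs : List (String × Int)), as.length + bs.length = n →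
      as.Pairwise (fun p q => p.1 < q.1) → bs.Pairwise (fun p q => p.1 < q.1) →
      ∀ b1 b2 : Bool,
      pvMergeScan as bs (b1, b2)
        = (b1 || (as.map (·.1) ++ bs.map (·.1)).any (fun k => decide (pvGet0 as k > pvGet0 bs k)),
           b2 || (as.map (·.1) ++ bs.map (·.1)).any (fun k => decide (pvGet0 bs k > pvGet0 as k))) := by
    intro n
    induction n using Nat.strong_induction_on with
    | _ n ih =>
      intro as bs hn hA hB b1 b2
      match as, bs with
      | [], [] => simp [pvMergeScan]
      | (k, v) :: as, [] =>
        rw [pvMergeScan, upd_eq]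
        rw [ih (as.length + 0) (by simp at hn; omega) as [] rfl (List.pairwise_cons.mp hA).2 hB]
        have hk : k ∉ as.map (·.1) := by
          intro hmem
          rcases List.mem_map.mp hmem with ⟨q, hq, hqk⟩
          exact absurd (hqk ▸ (List.pairwise_cons.mp hA).1 q hq) (lt_irrefl k)
        have hcong : (as.map (·.1) ++ ([] : List (String × Int)).map (·.1)).any
              (fun k2 => decide (pvGet0 as k2 > pvGet0 [] k2))
            = (as.map (·.1) ++ ([] : List (String × Int)).map (·.1)).any
              (fun k2 => decide (pvGet0 ((k, v) :: as) k2 > pvGet0 [] k2)) := by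
          refine PySem.List.any_congr_mem (fun k2 hk2 => ?_)
          simp only [List.map_nil, List.append_nil] at hk2
          rw [pvGet0_cons_ne (k, v) as k2 (fun he => hk (by subst he; exact hk2))]
        have hcong2 : (as.map (·.1) ++ ([] : List (String × Int)).map (·.1)).any
              (fun k2 => decide (pvGet0 [] k2 > pvGet0 as k2))
            = (as.map (·.1) ++ ([] : List (String × Int)).map (·.1)).any
              (fun k2 => decide (pvGet0 [] k2 > pvGet0 ((k, v) :: as) k2)) := by
          refine PySem.List.any_congr_mem (fun k2 hk2 => ?_)
          simp only [List.map_nil, List.append_nil] at hk2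
          rw [pvGet0_cons_ne (k, v) as k2 (fun he => hk (by subst he; exact hk2))]
        rw [hcong, hcong2]
        simp [pvGet0_cons_self, pvGet0_nil, Bool.or_assoc]
      | [], (k', w) :: bs =>
        rw [pvMergeScan, upd_eq]
        rw [ih (0 + bs.length) (by simp at hn; omega) [] bs rfl hA (List.pairwise_cons.mp hB).2]
        have hk : k' ∉ bs.map (·.1) := by
          intro hmem
          rcases List.mem_map.mp hmem with ⟨q, hq, hqk⟩
          exact absurd (hqk ▸ (List.pairwise_cons.mp hB).1 q hq) (lt_irrefl k')
        have hcong : (([] : List (String × Int)).map (·.1) ++ bs.map (·.1)).any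
              (fun k2 => decide (pvGet0 [] k2 > pvGet0 bs k2))
            = (([] : List (String × Int)).map (·.1) ++ bs.map (·.1)).any
              (fun k2 => decide (pvGet0 [] k2 > pvGet0 ((k', w) :: bs) k2)) := by
          refine PySem.List.any_congr_mem (fun k2 hk2 => ?_)
          simp only [List.map_nil, List.nil_append] at hk2
          rw [pvGet0_cons_ne (k', w) bs k2 (fun he => hk (by subst he; exact hk2))]
        have hcong2 : (([] : List (String × Int)).map (·.1) ++ bs.map (·.1)).any
              (fun k2 => decide (pvGet0 bs k2 > pvGet0 [] k2))
            = (([] : List (String × Int)).map (·.1) ++ bs.map (·.1)).any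
              (fun k2 => decide (pvGet0 ((k', w) :: bs) k2 > pvGet0 [] k2)) := by
          refine PySem.List.any_congr_mem (fun k2 hk2 => ?_)
          simp only [List.map_nil, List.nil_append] at hk2
          rw [pvGet0_cons_ne (k', w) bs k2 (fun he => hk (by subst he; exact hk2))]
        rw [hcong, hcong2]
        simp [pvGet0_cons_self, pvGet0_nil, Bool.or_assoc]
      | (k, v) :: as, (k', w) :: bs =>
        rcases List.pairwise_cons.mp hA with ⟨hkas, hA'⟩
        rcases List.pairwise_cons.mp hB with ⟨hk'bs, hB'⟩
        rcases lt_trichotomy k k' with hlt | heq | hgt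
        · -- k < k' : key k is only in the left clock
          rw [pvMergeScan]
          rw [if_pos hlt, upd_eq]
          rw [ih (as.length + ((k', w) :: bs).length) (by simp at hn ⊢; omega) as _ rfl hA' hB]
          have hkR : pvGet0 ((k', w) :: bs) k = 0 := by
            apply pvGet0_of_not_mem
            intro hmem
            simp only [List.map_cons] at hmem
            rcases List.mem_cons.mp hmem with h | h
            · exact absurd (h ▸ hlt) (lt_irrefl k)
            · rcases List.mem_map.mp h with ⟨q, hq, hqk⟩
              have hlt2 : k < q.1 := lt_trans hlt (hk'bs q hq)
              exact absurd (hqk ▸ hlt2) (lt_irrefl k)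
          have hkas' : k ∉ as.map (·.1) := by
            intro hmem
            rcases List.mem_map.mp hmem with ⟨q, hq, hqk⟩
            exact absurd (hqk ▸ hkas q hq) (lt_irrefl k)
          have hcong : ∀ f : Int → Int → Bool,
              (as.map (·.1) ++ ((k', w) :: bs).map (·.1)).any
                (fun k2 => f (pvGet0 as k2) (pvGet0 ((k', w) :: bs) k2))
              = (as.map (·.1) ++ ((k', w) :: bs).map (·.1)).any
                (fun k2 => f (pvGet0 ((k, v) :: as) k2) (pvGet0 ((k', w) :: bs) k2)) := by
            intro f
            refine PySem.List.any_congr_mem (fun k2 hk2 => ?_)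
            have hne : k ≠ k2 := by
              intro he
              subst he
              rcases List.mem_append.mp hk2 with h | h
              · exact hkas' h
              · simp only [List.map_cons] at h
                rcases List.mem_cons.mp h with h | h
                · exact absurd (h ▸ hlt) (lt_irrefl k)
                · rcases List.mem_map.mp h with ⟨q, hq, hqk⟩
                  have hlt2 : k < q.1 := lt_trans hlt (hk'bs q hq)
                  exact absurd (hqk ▸ hlt2) (lt_irrefl k)
            rw [pvGet0_cons_ne (k, v) as k2 hne]
          rw [hcong (fun x y => decide (x > y)), hcong (fun x y => decide (y > x))]
          simp only [List.map_cons, List.cons_append, List.any_cons,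
            pvGet0_cons_self, hkR, Prod.mk.injEq]
          constructor <;>
            · cases hv : (decide (v > (0:Int)) : Bool) <;>
                cases hw : (decide ((0:Int) > v) : Bool) <;>
              simp [Bool.or_left_comm]
        · -- k = k' : the key is in both clocks
          subst heq
          rw [pvMergeScan]
          rw [if_neg (lt_irrefl k), if_neg (lt_irrefl k), upd_eq]
          rw [ih (as.length + bs.length) (by simp at hn ⊢; omega) as bs rfl hA' hB']
          have hkas' : k ∉ as.map (·.1) := by
            intro hmem
            rcases List.mem_map.mp hmem with ⟨q, hq, hqk⟩
            exact absurd (hqk ▸ hkas q hq) (lt_irrefl k)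
          have hkbs' : k ∉ bs.map (·.1) := by
            intro hmem
            rcases List.mem_map.mp hmem with ⟨q, hq, hqk⟩
            exact absurd (hqk ▸ hk'bs q hq) (lt_irrefl k)
          have hcong : ∀ f : Int → Int → Bool,
              (as.map (·.1) ++ bs.map (·.1)).any
                (fun k2 => f (pvGet0 as k2) (pvGet0 bs k2))
              = (as.map (·.1) ++ bs.map (·.1)).any
                (fun k2 => f (pvGet0 ((k, v) :: as) k2) (pvGet0 ((k, w) :: bs) k2)) := by
            intro f
            refine PySem.List.any_congr_mem (fun k2 hk2 => ?_)
            have hne : k ≠ k2 := by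
              intro he
              subst he
              rcases List.mem_append.mp hk2 with h | h
              · exact hkas' h
              · exact hkbs' h
            rw [pvGet0_cons_ne (k, v) as k2 hne, pvGet0_cons_ne (k, w) bs k2 hne]
          rw [hcong (fun x y => decide (x > y)), hcong (fun x y => decide (y > x))]
          simp only [List.map_cons, List.cons_append, List.any_cons, List.any_append,
            pvGet0_cons_self, Prod.mk.injEq]
          constructor <;>
            · cases hv : (decide (v > w) : Bool) <;>
                cases hw : (decide (w > v) : Bool) <;>
              simp [Bool.or_comm]
        · -- k' < k : key k' is only in the right clock
          rw [pvMergeScan]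
          rw [if_neg (lt_asymm hgt), if_pos hgt, upd_eq]
          rw [ih (((k, v) :: as).length + bs.length) (by simp at hn ⊢; omega) _ bs rfl hA hB']
          have hkL : pvGet0 ((k, v) :: as) k' = 0 := by
            apply pvGet0_of_not_mem
            intro hmem
            simp only [List.map_cons] at hmem
            rcases List.mem_cons.mp hmem with h | h
            · exact absurd (h ▸ hgt) (lt_irrefl k')
            · rcases List.mem_map.mp h with ⟨q, hq, hqk⟩
              have hlt2 : k' < q.1 := lt_trans hgt (hkas q hq)
              exact absurd (hqk ▸ hlt2) (lt_irrefl k')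
          have hk'bs' : k' ∉ bs.map (·.1) := by
            intro hmem
            rcases List.mem_map.mp hmem with ⟨q, hq, hqk⟩
            exact absurd (hqk ▸ hk'bs q hq) (lt_irrefl k')
          have hcong : ∀ f : Int → Int → Bool,
              (((k, v) :: as).map (·.1) ++ bs.map (·.1)).any
                (fun k2 => f (pvGet0 ((k, v) :: as) k2) (pvGet0 bs k2))
              = (((k, v) :: as).map (·.1) ++ bs.map (·.1)).any
                (fun k2 => f (pvGet0 ((k, v) :: as) k2) (pvGet0 ((k', w) :: bs) k2)) := by
            intro f
            refine PySem.List.any_congr_mem (fun k2 hk2 => ?_)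
            have hne : k' ≠ k2 := by
              intro he
              subst he
              rcases List.mem_append.mp hk2 with h | h
              · simp only [List.map_cons] at h
                rcases List.mem_cons.mp h with h | h
                · exact absurd (h ▸ hgt) (lt_irrefl k')
                · rcases List.mem_map.mp h with ⟨q, hq, hqk⟩
                  have hlt2 : k' < q.1 := lt_trans hgt (hkas q hq)
                  exact absurd (hqk ▸ hlt2) (lt_irrefl k')
              · exact hk'bs' h
            rw [pvGet0_cons_ne (k', w) bs k2 hne]
          rw [hcong (fun x y => decide (x > y)), hcong (fun x y => decide (y > x))]
          simp only [List.map_cons, List.cons_append, List.any_cons, List.any_append,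
            pvGet0_cons_self, hkL, Prod.mk.injEq]
          constructor <;>
            · cases hv : (decide ((0:Int) > w) : Bool) <;>
                cases hw : (decide (w > (0:Int)) : Bool) <;>
              simp [Bool.or_comm]
  exact H (as.length + bs.length) as bs rfl hA hB b1 b2

-- the item list of a clock has distinct keys: its key list is the ordered dedup of the clock's keys
theorem items_keys_eq (c : List (String × Int)) :
    (pvItems c).map (·.1) = PySem.List.dedup (c.map (·.1)) := by
  simp [pvItems, List.map_map, Function.comp_def]

theorem sorted_items_keys_nodup (c : List (String × Int)) :
    ((PySem.List.sorted (pvItems c) (·.1) false).map (·.1)).Nodup := by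
  have hperm : (PySem.List.sorted (pvItems c) (·.1) false).Perm (pvItems c) :=
    PySem.List.sorted_perm _ _ _
  refine ((hperm.map (·.1)).nodup_iff).mpr ?_
  rw [items_keys_eq]
  exact PySem.List.nodup_dedup _

theorem sorted_items_pairwise (c : List (String × Int)) :
    (PySem.List.sorted (pvItems c) (·.1) false).Pairwise (fun p q => p.1 < q.1) := by
  have hle : (PySem.List.sorted (pvItems c) (·.1) false).Pairwise (fun p q => p.1 ≤ q.1) :=
    PySem.List.sorted_pairwise _ _
  have hne : (PySem.List.sorted (pvItems c) (·.1) false).Pairwise (fun p q => p.1 ≠ q.1) :=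
    List.pairwise_map.mp (sorted_items_keys_nodup c)
  exact (hle.and hne).imp (fun h => lt_of_le_of_ne h.1 h.2)

theorem mem_keys_sorted_items (c : List (String × Int)) (k : String) :
    k ∈ (PySem.List.sorted (pvItems c) (·.1) false).map (·.1) ↔ k ∈ c.map (·.1) := by
  constructor
  · intro hm
    rcases List.mem_map.mp hm with ⟨p, hp, hpk⟩
    have hp' : p ∈ pvItems c := (PySem.List.mem_sorted _ _ _ _).mp hp
    rcases List.mem_map.mp hp' with ⟨k', hk', hke⟩
    rw [← hpk, ← hke]
    exact (PySem.List.mem_dedup _ _).mp hk'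
  · intro hm
    refine List.mem_map.mpr ⟨(k, pvGet0 c k), ?_, rfl⟩
    rw [PySem.List.mem_sorted]
    exact List.mem_map.mpr ⟨k, (PySem.List.mem_dedup _ _).mpr hm, rfl⟩

-- lookups through sorted(items(c)) agree with lookups in c
theorem pvGet0_sorted_items (c : List (String × Int)) (k : String) :
    pvGet0 (PySem.List.sorted (pvItems c) (·.1) false) k = pvGet0 c k := by
  by_cases hm : k ∈ c.map (·.1)
  · have hmem : (k, pvGet0 c k) ∈ PySem.List.sorted (pvItems c) (·.1) false := by
      rw [PySem.List.mem_sorted]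
      exact List.mem_map.mpr ⟨k, (PySem.List.mem_dedup _ _).mpr hm, rfl⟩
    exact pvGet0_of_mem _ (sorted_items_keys_nodup c) k _ hmem
  · rw [pvGet0_of_not_mem c k hm]
    exact pvGet0_of_not_mem _ k (fun h => hm ((mem_keys_sorted_items c k).mp h))

-- ===== VERDICT (by name: the statement is the Claim_ definition above) =====
theorem is_concurrent_py_spec : Claim_equal_is_concurrent_py := by
  intro clock1 clock2 _
  unfold Spec_is_concurrent_py is_concurrent_py is_concurrent_py_alt
  simp only [foldA_eq,
    mergeScan_eq _ _ (sorted_items_pairwise clock1) (sorted_items_pairwise clock2),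
    Bool.false_or]
  have hget : ∀ f : Int → Int → Bool,
      ((PySem.List.sorted (pvItems clock1) (·.1) false).map (·.1) ++
        (PySem.List.sorted (pvItems clock2) (·.1) false).map (·.1)).any
        (fun k => f (pvGet0 (PySem.List.sorted (pvItems clock1) (·.1) false) k)
                    (pvGet0 (PySem.List.sorted (pvItems clock2) (·.1) false) k))
      = ((PySem.List.sorted (pvItems clock1) (·.1) false).map (·.1) ++
        (PySem.List.sorted (pvItems clock2) (·.1) false).map (·.1)).any
        (fun k => f (pvGet0 clock1 k) (pvGet0 clock2 k)) := by
    intro f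
    refine PySem.List.any_congr_mem (fun k _ => ?_)
    rw [pvGet0_sorted_items clock1 k, pvGet0_sorted_items clock2 k]
  have hmem : ∀ k : String,
      k ∈ PySem.Set.union (PySem.Set.ofList (clock1.map (·.1))) (PySem.Set.ofList (clock2.map (·.1)))
      ↔ k ∈ ((PySem.List.sorted (pvItems clock1) (·.1) false).map (·.1) ++
             (PySem.List.sorted (pvItems clock2) (·.1) false).map (·.1)) := by
    intro k
    rw [List.mem_append, mem_keys_sorted_items, mem_keys_sorted_items]
    simp [PySem.Set.mem_union, PySem.Set.mem_ofList]
  congr 1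
  · rw [hget (fun x y => decide (x > y))]
    exact any_congr_mem_iff _ _ _ hmem
  · rw [hget (fun x y => decide (y > x))]
    exact any_congr_mem_iff _ _ _ hmem
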